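-- pv_equiv track=rewrite | github.com/klzgrad/naiveproxy | src/third_party/angle/third_party/VK-GL-CTS/src/scripts/khr_util/format.py | indentLines
-- ===== SOURCE A (Python) =====
-- def nextMod (val, mod):
-- 	if val % mod == 0:
-- 		return val + mod
-- 	else:
-- 		return int(val/mod)*mod + mod
--
-- def indentLines (lines):
-- 	tabSize = 4
--
-- 	# Split into columns
-- 	lineColumns = [line.split("\t") for line in lines if line is not None]
-- 	if len(lineColumns) == 0:
-- 		return
--
-- 	numColumns = max(len(line) for line in lineColumns)
--
-- 	# Figure out max length per column
-- 	columnLengths = [nextMod(max(len(line[ndx]) for line in lineColumns if len(line) > ndx), tabSize) for ndx in range(numColumns)]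
--
-- 	for line in lineColumns:
-- 		indented = []
-- 		for columnNdx, col in enumerate(line[:-1]):
-- 			colLen	= len(col)
-- 			while colLen < columnLengths[columnNdx]:
-- 				col		+= "\t"
-- 				colLen	 = nextMod(colLen, tabSize)
-- 			indented.append(col)
--
-- 		# Append last col
-- 		indented.append(line[-1])
-- 		yield "".join(indented)
-- ===== SOURCE B (Python) =====
-- def indentLines(lines):
-- 	tabSize = 4
--
-- 	rows = [line.split("\t") for line in lines if line is not None]
-- 	if not rows:
-- 		return
--
-- 	# One pass to collect per-column max lengths (grow-and-max merge instead of per-column rescans)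
-- 	maxLens = []
-- 	for row in rows:
-- 		maxLens = [max(maxLens[i] if i < len(maxLens) else 0,
-- 		               len(row[i]) if i < len(row) else 0)
-- 		           for i in range(max(len(maxLens), len(row)))]
--
-- 	# Tab stop for each column (first multiple of tabSize strictly above the max length)
-- 	stops = [(m // tabSize + 1) * tabSize for m in maxLens]
--
-- 	for row in rows:
-- 		yield "".join(col + "\t" * ((stops[i] - (len(col) // tabSize + 1) * tabSize) // tabSize + 1)
-- 		              for i, col in enumerate(row[:-1])) + row[-1]
-- ===== Notes on version B (the rewrite author's own statement) =====
-- stated objective: alternative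
-- what changed: B computes the per-column maxima in a single merge pass over the rows (instead of rescanning all rows once per column index) and replaces the tab-appending while-loop with a closed-form tab count, emitting each line by a join of arithmetic-padded columns.
import Mathlib
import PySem

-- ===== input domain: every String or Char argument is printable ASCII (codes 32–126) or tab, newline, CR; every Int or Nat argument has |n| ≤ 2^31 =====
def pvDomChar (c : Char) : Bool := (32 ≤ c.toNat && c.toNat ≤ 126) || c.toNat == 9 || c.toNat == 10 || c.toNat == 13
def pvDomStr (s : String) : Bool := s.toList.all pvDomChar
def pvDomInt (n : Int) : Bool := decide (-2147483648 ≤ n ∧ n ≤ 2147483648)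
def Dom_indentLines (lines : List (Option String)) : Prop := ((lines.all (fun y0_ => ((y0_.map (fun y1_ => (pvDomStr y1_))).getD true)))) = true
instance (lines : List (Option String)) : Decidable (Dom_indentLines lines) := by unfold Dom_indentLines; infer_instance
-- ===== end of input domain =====

-- B replaces A's per-column max rescans by a single merge pass over the rows and A's
-- tab-appending while-loop by a closed-form tab count (objective: alternative).
-- Both Pythons are generators; equivalence is about the list of yielded lines.

-- ===== PORT A =====
-- nextMod; Python's int(val/mod) equals Nat division for the nonnegative lengths A feeds it
def nextModA (val mod : Nat) : Nat :=
  if val % mod == 0 then val + mod else val / mod * mod + mod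

-- cited by padLoopA's termination proof (the port needs it by name)
theorem nextModA_lt (v : Nat) : v < nextModA v 4 := by
  unfold nextModA; split <;> omega

-- the while-loop `while colLen < columnLengths[columnNdx]: col += "\t"; colLen = nextMod(colLen, 4)`
def padLoopA (col : List Char) (colLen target : Nat) : List Char :=
  if colLen < target then padLoopA (col ++ ['\t']) (nextModA colLen 4) target else col
termination_by target - colLen
decreasing_by have := nextModA_lt colLen; omega

def indentLines (lines : List (Option String)) : List String :=
  -- lineColumns = [line.split("\t") for line in lines if line is not None]
  let lineColumns : List (List (List Char)) :=
    (lines.filterMap id).map (fun line => PySem.Chars.splitOn line.toList ['\t'])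
  if lineColumns.length = 0 then [] else
    -- numColumns = max(len(line) for line in lineColumns); nonempty here, so getD 0 is a totalization guard
    let numColumns : Nat :=
      (PySem.List.max? (lineColumns.map (fun line => line.length)) (fun x => x)).getD 0
    -- columnLengths: per ndx, max over the rows that have that column (getD's default is never read), then nextMod
    let columnLengths : List Nat := (List.range numColumns).map (fun ndx =>
      nextModA ((PySem.List.max?
        ((lineColumns.filter (fun line => decide (ndx < line.length))).map
          (fun line => (line.getD ndx []).length)) (fun x => x)).getD 0) 4)
    lineColumns.map (fun line =>
      -- for columnNdx, col in enumerate(line[:-1]): while-pad, append (indices are Nat, from 0)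
      let indented : List (List Char) := (line.dropLast.zipIdx).foldl
        (fun acc p => acc ++ [padLoopA p.1 p.1.length (columnLengths.getD p.2 0)]) []
      -- indented.append(line[-1]); yield "".join(indented)   (line ≠ []: split never returns [])
      String.ofList (PySem.Chars.join [] (indented ++ [line.getLastD []])))

-- ===== PORT B =====
-- maxLens = [max(old-or-0, new-or-0) for i in range(max(len(maxLens), len(row)))]
def mergeRowB (acc : List Nat) (row : List (List Char)) : List Nat :=
  (List.range (max acc.length row.length)).map
    (fun i => max (acc.getD i 0) ((row.getD i []).length))

def indentLines_alt (lines : List (Option String)) : List String :=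
  let rows : List (List (List Char)) :=
    (lines.filterMap id).map (fun line => PySem.Chars.splitOn line.toList ['\t'])
  if rows.isEmpty then [] else
    let maxLens : List Nat := rows.foldl mergeRowB []
    let stops : List Nat := maxLens.map (fun m => (m / 4 + 1) * 4)
    rows.map (fun row =>
      String.ofList (PySem.Chars.join []
        ((row.dropLast.zipIdx).map (fun p =>
          p.1 ++ List.replicate ((stops.getD p.2 0 - (p.1.length / 4 + 1) * 4) / 4 + 1) '\t'))
        ++ row.getLastD []))

-- ===== PRECONDITION & SPEC =====
def Spec_indentLines (lines : List (Option String)) (out : List String) : Prop := out = indentLines_alt lines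
instance (lines : List (Option String)) (out : List String) : Decidable (Spec_indentLines lines out) := by unfold Spec_indentLines; infer_instance

-- ===== CLAIM (what is proved, stated in full; the proofs are below) =====
def Claim_equal_indentLines : Prop := ∀ (lines : List (Option String)), Dom_indentLines lines → Spec_indentLines lines (indentLines lines)

-- ===== LEMMAS AND PROOFS =====

-- "".join over List Char is concatenation
theorem join_eq_flatten (l : List (List Char)) : PySem.Chars.join [] l = l.flatten := by
  induction l with
  | nil => exact PySem.Chars.join_nil []
  | cons a t ih =>
    cases t with
    | nil => simp [PySem.Chars.join_singleton [] a]
    | cons b t2 => rw [PySem.Chars.join_cons_cons]; simp_all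

-- max() with the 0 totalization default is the running-max fold from 0
theorem maxD0 (xs : List Nat) : (PySem.List.max? xs (fun x => x)).getD 0 = xs.foldl max 0 := by
  cases xs with
  | nil => simp [PySem.List.max?]
  | cons x t => rw [PySem.List.max?_id_cons]; simp

theorem nextModA_eq (v : Nat) : nextModA v 4 = (v / 4 + 1) * 4 := by
  unfold nextModA; split <;> rename_i h <;> simp only [beq_iff_eq] at h <;> omega

-- A's tab-appending while-loop in closed form (fuel n bounds the remaining distance)
theorem padLoopA_eq : ∀ (n : Nat) (col : List Char) (colLen target : Nat),
    target - colLen ≤ n → 4 ∣ target → colLen < target →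
    padLoopA col colLen target = col ++ List.replicate ((target - (colLen / 4 + 1) * 4) / 4 + 1) '\t' := by
  intro n
  induction n with
  | zero => intro col colLen target h1 _ h2; omega
  | succ n ih =>
    intro col colLen target h1 h4 h2
    rw [padLoopA, if_pos h2, nextModA_eq]
    by_cases h3 : (colLen / 4 + 1) * 4 < target
    · rw [ih _ _ _ (by omega) h4 h3]
      have e1 : ((colLen / 4 + 1) * 4 / 4 + 1) * 4 = (colLen / 4 + 1) * 4 + 4 := by omega
      rw [e1]
      have e2 : (target - ((colLen / 4 + 1) * 4 + 4)) / 4 + 1 + 1 = (target - (colLen / 4 + 1) * 4) / 4 + 1 := by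
        omega
      rw [List.append_assoc]
      congr 1
      rw [← e2]; simp [List.replicate_succ]
    · rw [padLoopA, if_neg h3]
      have : (target - (colLen / 4 + 1) * 4) / 4 + 1 = 1 := by omega
      rw [this]; rfl

theorem mergeRowB_getD (acc : List Nat) (row : List (List Char)) (i : Nat) :
    (mergeRowB acc row).getD i 0 = max (acc.getD i 0) ((row.getD i []).length) := by
  unfold mergeRowB
  by_cases h : i < max acc.length row.length
  · rw [List.getD_eq_getElem _ _ (by simpa using h)]
    simp
  · rw [List.getD_eq_default _ _ (by simpa using h)]
    rw [List.getD_eq_default _ _ (by omega), List.getD_eq_default _ _ (by omega)]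
    simp

theorem mergeRowB_length (acc : List Nat) (row : List (List Char)) :
    (mergeRowB acc row).length = max acc.length row.length := by
  simp [mergeRowB]

-- B's merge pass, read off entry-wise: a running max of the column's lengths
theorem foldl_merge_getD (rows : List (List (List Char))) : ∀ (acc : List Nat) (i : Nat),
    (rows.foldl mergeRowB acc).getD i 0
      = rows.foldl (fun m r => max m ((r.getD i []).length)) (acc.getD i 0) := by
  induction rows with
  | nil => intro acc i; rfl
  | cons r t ih => intro acc i; simp only [List.foldl_cons, ih, mergeRowB_getD]

theorem foldl_merge_length (rows : List (List (List Char))) : ∀ (acc : List Nat),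
    (rows.foldl mergeRowB acc).length = rows.foldl (fun m r => max m r.length) acc.length := by
  induction rows with
  | nil => intro acc; rfl
  | cons r t ih => intro acc; simp only [List.foldl_cons, ih, mergeRowB_length]

-- A's max over the rows owning column ndx = max over all rows of getD-length (missing rows contribute 0)
theorem filter_foldl_max (rows : List (List (List Char))) (ndx : Nat) : ∀ (init : Nat),
    ((rows.filter (fun line => decide (ndx < line.length))).map
      (fun line => (line.getD ndx []).length)).foldl max init
    = rows.foldl (fun m r => max m ((r.getD ndx []).length)) init := by
  induction rows with
  | nil => intro init; rfl
  | cons r t ih =>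
    intro init
    by_cases h : ndx < r.length
    · simp only [List.filter_cons, decide_eq_true_eq, h, if_pos, List.map_cons, List.foldl_cons]
      rw [List.getD_eq_getElem _ _ h]
      simpa using ih (max init r[ndx].length)
    · have hg : r.getD ndx [] = [] := List.getD_eq_default _ _ (by omega)
      simp only [List.filter_cons, decide_eq_true_eq, h, List.foldl_cons, hg,
        List.length_nil, Nat.max_zero]
      simpa using ih init

theorem ports_eq (lines : List (Option String)) : indentLines lines = indentLines_alt lines := by
  simp only [indentLines, indentLines_alt]
  set rows : List (List (List Char)) :=
    (lines.filterMap id).map (fun line => PySem.Chars.splitOn line.toList ['\t']) with hrows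
  by_cases hne : rows = []
  · simp [hne]
  · rw [if_neg (by simp [hne]), if_neg (by simp [hne])]
    have hn : (PySem.List.max? (rows.map (fun l => l.length)) (fun x => x)).getD 0
        = rows.foldl (fun m r => max m r.length) 0 := by
      rw [maxD0, List.foldl_map]
    have hlen : (rows.foldl mergeRowB []).length = rows.foldl (fun m r => max m r.length) 0 := by
      simpa using foldl_merge_length rows []
    have hget : ∀ i, (rows.foldl mergeRowB []).getD i 0
        = rows.foldl (fun m r => max m ((r.getD i []).length)) 0 := by
      intro i; simpa using foldl_merge_getD rows [] i
    -- A's columnLengths list is B's stops list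
    have hCL : (List.range ((PySem.List.max? (rows.map (fun line => line.length)) (fun x => x)).getD 0)).map
          (fun ndx => nextModA ((PySem.List.max?
            ((rows.filter (fun line => decide (ndx < line.length))).map
              (fun line => (line.getD ndx []).length)) (fun x => x)).getD 0) 4)
        = (rows.foldl mergeRowB []).map (fun m => (m / 4 + 1) * 4) := by
      apply List.ext_getElem
      · simp [hn, hlen]
      · intro i h1 h2
        simp only [List.getElem_map, List.getElem_range]
        have h2' : i < (rows.foldl mergeRowB []).length := by simpa using h2
        have hgi : (rows.foldl mergeRowB [])[i]'h2'
            = rows.foldl (fun m r => max m ((r.getD i []).length)) 0 := by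
          rw [← List.getD_eq_getElem _ 0 h2', hget i]
        rw [maxD0, filter_foldl_max, nextModA_eq, hgi]
    rw [hCL]
    apply List.map_congr_left
    intro row hrow
    have hrn : row.length ≤ rows.foldl (fun m r => max m r.length) 0 :=
      (PySem.List.le_foldl_max_nat rows (fun r => r.length) 0).2 row hrow
    rw [PySem.List.foldl_append_singleton_eq_map, List.nil_append,
        join_eq_flatten, join_eq_flatten, List.flatten_append]
    simp only [List.flatten_cons, List.flatten_nil, List.append_nil]
    congr 2
    congr 1
    apply List.map_congr_left
    rintro ⟨col, ndx⟩ hp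
    obtain ⟨-, hnd, hcol⟩ := List.mem_zipIdx hp
    simp only [Nat.zero_add, Nat.sub_zero] at hnd hcol
    have hdl : row.dropLast.length = row.length - 1 := List.length_dropLast
    have hndrow : ndx < row.length := by omega
    have hcol' : col = row[ndx] := by rw [hcol, List.getElem_dropLast]
    have hmlen : ndx < (rows.foldl mergeRowB []).length := by rw [hlen]; omega
    have hstop : (List.map (fun m => (m / 4 + 1) * 4) (rows.foldl mergeRowB [])).getD ndx 0
        = ((rows.foldl (fun m r => max m ((r.getD ndx []).length)) 0) / 4 + 1) * 4 := by
      rw [List.getD_eq_getElem _ _ (by simpa using hmlen), List.getElem_map,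
          ← List.getD_eq_getElem _ 0 hmlen, hget]
    have hcl : col.length ≤ rows.foldl (fun m r => max m ((r.getD ndx []).length)) 0 := by
      have h2 := (PySem.List.le_foldl_max_nat rows (fun r => (r.getD ndx []).length) 0).2 row hrow
      rwa [List.getD_eq_getElem _ _ hndrow, ← hcol'] at h2
    dsimp only
    rw [hstop]
    exact padLoopA_eq _ col col.length _ (Nat.le_refl _) ⟨_, Nat.mul_comm _ _⟩ (by omega)

-- ===== VERDICT (by name: the statement is the Claim_ definition above) =====
theorem indentLines_spec : Claim_equal_indentLines := by
  intro lines _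
  unfold Spec_indentLines
  exact ports_eq lines
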